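-- pv_equiv track=rewrite | github.com/linuxscout/strm-tests | strmquiz/sequentiel/chronograms.py | truncate_signal
-- ===== SOURCE A (Python) =====
-- def truncate_signal(sig, size: int):
--     """
--     Truncate a signal sequence so that the total absolute length
--     does not exceed the given size.
--
--     Args:
--         sig (list[int]): A sequence of signed integers, where each element
--                          represents a segment length (positive or negative).
--         size (int): Maximum allowed total length.
--
--     Returns:
--         list[int]: A new list with segments truncated if necessary.
--     """
--     total_len = sum(abs(x) for x in sig)
--     if total_len <= size:
--         return sig[:]  # return a copy
--
--     result = []
--     used = 0
--     for x in sig: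
--         seg_len = abs(x)
--         if used + seg_len > size:
--             # Truncate current segment
--             remainder = size - used
--             result.append(remainder if x > 0 else -remainder)
--             break
--         else:
--             result.append(x)
--             used += seg_len
--             if used == size:
--                 break
--     return result
-- ===== SOURCE B (Python) =====
-- from itertools import accumulate, takewhile
--
--
-- def truncate_signal(sig, size: int):
--     """Truncate signed segments to a total absolute length of at most `size`,
--     via a cumulative-sum table and takewhile instead of an explicit loop."""
--     cums = list(accumulate(abs(x) for x in sig))
--     if not sig or cums[-1] <= size:
--         return list(sig)
--     pairs = list(zip(sig, cums))
--     head = [x for x, _ in takewhile(lambda p: p[1] < size, pairs)]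
--     k = len(head)
--     x, c = pairs[k]
--     if c == size:
--         return head + [x]
--     before = cums[k - 1] if k else 0
--     rem = size - before
--     return head + [rem if x > 0 else -rem]
-- ===== Notes on version B (the rewrite author's own statement) =====
-- stated objective: alternative
-- what changed: Replaces A's explicit for-loop with break and a running 'used' accumulator by a cumulative-absolute-sum table (itertools.accumulate) consumed with takewhile, reading the cut point off the prefix table.
import Mathlib
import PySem

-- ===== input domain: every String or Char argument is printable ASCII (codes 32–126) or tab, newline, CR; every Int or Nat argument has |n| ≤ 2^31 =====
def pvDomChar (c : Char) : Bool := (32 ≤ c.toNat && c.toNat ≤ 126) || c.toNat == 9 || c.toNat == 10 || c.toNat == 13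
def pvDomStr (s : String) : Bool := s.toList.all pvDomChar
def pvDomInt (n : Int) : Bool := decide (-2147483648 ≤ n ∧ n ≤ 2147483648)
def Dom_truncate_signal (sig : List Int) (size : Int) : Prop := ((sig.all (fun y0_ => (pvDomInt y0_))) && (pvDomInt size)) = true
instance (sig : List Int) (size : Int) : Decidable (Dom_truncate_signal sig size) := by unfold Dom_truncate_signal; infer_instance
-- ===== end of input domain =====

-- B replaces A's explicit accumulator loop with a cumulative-sum table consumed by takeWhile (alternative decomposition, same cost).


-- ===== PORT A =====
-- the for-loop with accumulator `used`; `break` is rendered as stopping the recursion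
def truncAGo (size : Int) : List Int → Int → List Int
  | [], _ => []
  | x :: xs, used =>
    let seg_len := |x|
    if used + seg_len > size then
      let remainder := size - used
      [if x > 0 then remainder else -remainder]
    else
      if used + seg_len = size then [x]
      else x :: truncAGo size xs (used + seg_len)

def truncate_signal (sig : List Int) (size : Int) : List Int :=
  let total_len := (sig.map (fun x => |x|)).sum
  if total_len ≤ size then sig
  else truncAGo size sig 0

-- ===== PORT B =====
-- cums = list(accumulate(abs(x) for x in sig)) ported as scanl with the initial 0 dropped
def truncate_signal_alt (sig : List Int) (size : Int) : List Int :=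
  let cums := (List.scanl (fun a x => a + |x|) 0 sig).tail
  if sig = [] ∨ cums.getLastD 0 ≤ size then sig
  else
    let pairs := sig.zip cums
    let head := (pairs.takeWhile (fun p => p.2 < size)).map Prod.fst
    let k := head.length
    let xc := pairs.getD k (0, 0)
    if xc.2 = size then head ++ [xc.1]
    else
      let before := if k = 0 then 0 else cums.getD (k - 1) 0
      let rem := size - before
      head ++ [if xc.1 > 0 then rem else -rem]

-- ===== PRECONDITION & SPEC =====
def Spec_truncate_signal (sig : List Int) (size : Int) (out : List Int) : Prop := out = truncate_signal_alt sig size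
instance (sig : List Int) (size : Int) (out : List Int) : Decidable (Spec_truncate_signal sig size out) := by unfold Spec_truncate_signal; infer_instance

-- ===== CLAIM (what is proved, stated in full; the proofs are below) =====
def Claim_equal_truncate_signal : Prop := ∀ (sig : List Int) (size : Int), Dom_truncate_signal sig size → Spec_truncate_signal sig size (truncate_signal sig size)

-- ===== LEMMAS AND PROOFS =====

def sumAbs (l : List Int) : Int := (l.map (fun x => |x|)).sum

-- the else-branch of B's port, parameterised by the running base `used`
def altCore (size : Int) (sig : List Int) (used : Int) : List Int :=
  let cums := (List.scanl (fun a x => a + |x|) used sig).tail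
  let pairs := sig.zip cums
  let head := (pairs.takeWhile (fun p => p.2 < size)).map Prod.fst
  let k := head.length
  let xc := pairs.getD k (0, 0)
  if xc.2 = size then head ++ [xc.1]
  else
    let before := if k = 0 then used else cums.getD (k - 1) 0
    let rem := size - before
    head ++ [if xc.1 > 0 then rem else -rem]

lemma scanl_tail_cons (used x : Int) (xs : List Int) :
    (List.scanl (fun a x => a + |x|) used (x :: xs)).tail
      = (used + |x|) :: (List.scanl (fun a x => a + |x|) (used + |x|) xs).tail := by
  cases xs <;> simp [List.scanl]

lemma scanl_tail_eq (used x : Int) (xs : List Int) :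
    (List.scanl (fun a x => a + |x|) used (x :: xs)).tail
      = List.scanl (fun a x => a + |x|) (used + |x|) xs := by
  simp [List.scanl_cons]

lemma getLastD_scanl (l : List Int) : ∀ a d : Int,
    (List.scanl (fun b x => b + |x|) a l).getLastD d = a + sumAbs l := by
  induction l with
  | nil => intro a d; simp [sumAbs]
  | cons x xs ih =>
    intro a d
    rw [List.scanl_cons, List.getLastD_cons, ih (a + |x|) a]
    simp [sumAbs]; ring

lemma truncAGo_cons_lt (size x used : Int) (xs : List Int)
    (h1 : ¬ used + |x| > size) (h2 : used + |x| ≠ size) :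
    truncAGo size (x :: xs) used = x :: truncAGo size xs (used + |x|) := by
  simp [truncAGo, h1, h2]

lemma getD_cons_pred (a d : Int) (l : List Int) (k : Nat) :
    (a :: l).getD (k + 1 - 1) d = if k = 0 then a else l.getD (k - 1) d := by
  cases k <;> simp [List.getD]

lemma altCore_cons_lt (size x used : Int) (xs : List Int) (hlt : used + |x| < size) :
    altCore size (x :: xs) used = x :: altCore size xs (used + |x|) := by
  simp only [altCore, scanl_tail_cons, List.zip_cons_cons, List.takeWhile_cons,
    decide_eq_true_eq, if_pos hlt, List.map_cons, List.length_cons,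
    List.getD_cons_succ, Nat.succ_ne_zero, if_false, getD_cons_pred]
  split <;> simp

lemma altCore_eq (size : Int) : ∀ (xs : List Int) (x used : Int),
    used + |x| + sumAbs xs > size →
    truncAGo size (x :: xs) used = altCore size (x :: xs) used := by
  intro xs
  induction xs with
  | nil =>
    intro x used h
    simp [sumAbs] at h
    by_cases h2 : used + |x| = size
    · omega
    · simp [truncAGo, altCore, h2,
        show used + |x| > size by omega, show ¬ (used + |x| < size) by omega]
  | cons y ys ih =>
    intro x used h
    by_cases h1 : used + |x| > size
    · by_cases h2 : used + |x| = size
      · omega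
      · simp [truncAGo, altCore, h1, h2,
          show ¬ (used + |x| < size) by omega]
    · by_cases h2 : used + |x| = size
      · simp [truncAGo, altCore, h2]
      · have hlt : used + |x| < size := by omega
        have ih' := ih y (used + |x|) (by simp [sumAbs] at h ⊢; omega)
        rw [truncAGo_cons_lt size x used (y :: ys) h1 h2, ih',
          altCore_cons_lt size x used (y :: ys) hlt]

theorem truncate_signal_eq (sig : List Int) (size : Int) :
    truncate_signal sig size = truncate_signal_alt sig size := by
  cases sig with
  | nil => simp [truncate_signal, truncate_signal_alt, truncAGo]
  | cons x xs =>
    have htot : ((List.scanl (fun a x => a + |x|) 0 (x :: xs)).tail).getLastD 0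
        = sumAbs (x :: xs) := by
      rw [scanl_tail_eq, getLastD_scanl]
      simp [sumAbs]
    by_cases hle : sumAbs (x :: xs) ≤ size
    · simp only [truncate_signal, truncate_signal_alt, htot]
      rw [if_pos (by simpa [sumAbs] using hle), if_pos (Or.inr hle)]
    · have h2 := altCore_eq size xs x 0 (by simp [sumAbs] at hle ⊢; omega)
      simp only [truncate_signal, truncate_signal_alt, htot]
      rw [if_neg (by simpa [sumAbs] using hle), if_neg (by simp [hle]), h2]
      rfl

-- ===== VERDICT (by name: the statement is the Claim_ definition above) =====
theorem truncate_signal_spec : Claim_equal_truncate_signal := by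
  intro sig size _
  exact truncate_signal_eq sig size
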